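-- pv_equiv track=rewrite | github.com/Lemao81/python_code_monkey | common.py | right_shift_string_extended
-- ===== SOURCE A (Python) =====
-- def right_shift_string_extended(string: str):
--     if not string:
--         return string
--     chars = list(string)
--     temp1 = None
--     for i, char in enumerate(chars):
--         temp2 = char
--         if temp1 is not None:
--             chars[i] = temp1
--         temp1 = temp2
--     chars[0] = temp1
--
--     return "".join(chars)
-- ===== SOURCE B (Python) =====
-- def right_shift_string_extended(string: str):
--     if not string:
--         return string
--     return string[-1] + string[:-1]
-- ===== Notes on version B (the rewrite author's own statement) =====
-- stated objective: idiomatic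
-- what changed: Replaces A's index-shifting loop over a mutable char list (carrying a temp-pair through enumerate) with the single closed-form slice expression string[-1] + string[:-1].
import Mathlib
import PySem

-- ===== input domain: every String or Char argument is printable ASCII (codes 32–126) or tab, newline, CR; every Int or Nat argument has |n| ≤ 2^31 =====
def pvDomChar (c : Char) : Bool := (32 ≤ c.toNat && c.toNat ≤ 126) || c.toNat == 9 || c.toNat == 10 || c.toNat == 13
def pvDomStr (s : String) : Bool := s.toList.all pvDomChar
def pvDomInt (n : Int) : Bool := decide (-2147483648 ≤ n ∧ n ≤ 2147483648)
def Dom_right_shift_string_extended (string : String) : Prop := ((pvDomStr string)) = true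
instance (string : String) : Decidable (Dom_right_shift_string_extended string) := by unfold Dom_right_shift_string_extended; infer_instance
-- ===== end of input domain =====

-- B replaces A's index-shifting loop over a mutable char list with the closed-form
-- slice expression string[-1] + string[:-1] (idiomatic; same O(n) cost).


-- ===== PORT A =====
-- the for-loop over enumerate(chars): state = (chars, temp1), i the running index;
-- writes only hit index i after it was read, so reads see the original characters
def rssLoop (chars : List Char) (temp1 : Option Char) (i : Nat) (rest : List Char) :
    List Char × Option Char :=
  match rest with
  | [] => (chars, temp1)
  | c :: rs =>
      let chars' := match temp1 with
        | some t => chars.set i t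
        | none => chars
      rssLoop chars' (some c) (i + 1) rs

def right_shift_string_extended (string : String) : String :=
  if string = "" then string
  else
    let chars := string.toList
    let r := rssLoop chars none 0 chars
    match r.2 with
    | some t => String.ofList (r.1.set 0 t)      -- chars[0] = temp1
    | none => String.ofList r.1                   -- unreachable: chars is nonempty

-- ===== PORT B =====
def right_shift_string_extended_alt (string : String) : String :=
  if string = "" then string
  else
    let cs := string.toList
    match PySem.List.pyGet? cs (-1) with     -- string[-1]
    | some c => String.ofList (c :: PySem.List.slice cs none (some (-1)))  -- + string[:-1]
    | none => string                          -- unreachable: cs is nonempty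

-- ===== PRECONDITION & SPEC =====
def Spec_right_shift_string_extended (string : String) (out : String) : Prop := out = right_shift_string_extended_alt string
instance (string : String) (out : String) : Decidable (Spec_right_shift_string_extended string out) := by unfold Spec_right_shift_string_extended; infer_instance

-- ===== CLAIM (what is proved, stated in full; the proofs are below) =====
def Claim_equal_right_shift_string_extended : Prop := ∀ (string : String), Dom_right_shift_string_extended string → Spec_right_shift_string_extended string (right_shift_string_extended string)

-- ===== LEMMAS AND PROOFS =====

lemma rssLoop_inv (suf : List Char) : ∀ (pre : List Char) (t : Char),
    rssLoop (pre ++ suf) (some t) pre.length suf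
      = (pre ++ (t :: suf).dropLast, some (suf.getLastD t)) := by
  induction suf with
  | nil => intro pre t; simp [rssLoop]
  | cons c rs ih =>
    intro pre t
    have hset : (pre ++ c :: rs).set pre.length t = pre ++ t :: rs := by
      simp
    have h2 := ih (pre ++ [t]) c
    simp only [List.append_assoc, List.singleton_append, List.length_append,
      List.length_singleton] at h2
    simp only [rssLoop, hset]
    rw [h2]
    cases rs <;> simp [List.getLast?_eq_some_getLast]

theorem right_shift_string_extended_spec : Claim_equal_right_shift_string_extended := by
  intro s _
  unfold Spec_right_shift_string_extended right_shift_string_extended right_shift_string_extended_alt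
  by_cases hs : s = ""
  · simp [hs]
  · have hne : s.toList ≠ [] := by
      simpa using hs
    obtain ⟨a, rest, hl⟩ := List.exists_cons_of_ne_nil hne
    simp only [hs, ite_false, hl]
    have h1 : rssLoop (a :: rest) none 0 (a :: rest)
        = rssLoop (a :: rest) (some a) 1 rest := by
      simp [rssLoop]
    have h2 := rssLoop_inv rest [a] a
    simp only [List.singleton_append, List.length_singleton] at h2
    have hlast : (a :: rest).getLast? = some (rest.getLastD a) := by
      cases rest <;> simp [List.getLastD, List.getLast?_eq_some_getLast]
    rw [h1, h2]
    simp [PySem.List.pyGet?_neg_one, PySem.List.slice_to_neg_one, hlast]
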